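-- pv_equiv track=rewrite | github.com/gprabaha/social_gaze_mech_otnal | eye_mvm_saccade.py | determine_block
-- ===== SOURCE A (Python) =====
-- def determine_block(start_time, end_time, startS, stopS):
--     if start_time < startS[0] or end_time > stopS[-1]:
--         return 'discard'
--     for i, (run_start, run_stop) in enumerate(zip(startS, stopS), start=1):
--         if start_time >= run_start and end_time <= run_stop:
--             return 'mon_down'
--         elif i < len(startS) and end_time <= startS[i]:
--             return 'mon_up'
--     return 'discard'
-- ===== SOURCE B (Python) =====
-- def determine_block(start_time, end_time, startS, stopS):
--     if start_time < startS[0] or end_time > stopS[-1]: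
--         return 'discard'
--     n = min(len(startS), len(stopS))
--     d = next((j for j in range(n)
--               if start_time >= startS[j] and end_time <= stopS[j]), None)
--     u = next((j for j in range(n)
--               if j + 1 < len(startS) and end_time <= startS[j + 1]), None)
--     if d is None and u is None:
--         return 'discard'
--     if u is None:
--         return 'mon_down'
--     if d is None:
--         return 'mon_up'
--     return 'mon_down' if d <= u else 'mon_up'
-- ===== Notes on version B (the rewrite author's own statement) =====
-- stated objective: alternative
-- what changed: A's single interleaved loop (which checks the containment condition and the gap condition alternately at each index and returns on the first hit) is replaced by two independent first-match scans computing the first 'mon_down' index and the first 'mon_up' index separately, classifying by comparing the two indices.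
import Mathlib
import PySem

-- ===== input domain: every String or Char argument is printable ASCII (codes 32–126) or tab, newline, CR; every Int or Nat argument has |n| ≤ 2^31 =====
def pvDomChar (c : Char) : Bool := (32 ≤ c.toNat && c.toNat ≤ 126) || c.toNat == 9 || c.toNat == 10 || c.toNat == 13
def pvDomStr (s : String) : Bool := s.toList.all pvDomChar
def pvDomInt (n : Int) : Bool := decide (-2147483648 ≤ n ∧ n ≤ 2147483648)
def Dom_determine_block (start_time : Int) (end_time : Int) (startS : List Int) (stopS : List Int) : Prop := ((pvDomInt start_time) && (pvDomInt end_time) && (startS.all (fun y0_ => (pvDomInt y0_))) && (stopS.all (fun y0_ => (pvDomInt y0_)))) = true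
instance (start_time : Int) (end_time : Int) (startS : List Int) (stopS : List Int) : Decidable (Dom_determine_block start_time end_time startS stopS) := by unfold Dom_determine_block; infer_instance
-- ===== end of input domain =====

-- B replaces A's single interleaved scan by two independent first-match scans
-- (first containment index, first gap index) compared afterwards: alternative decomposition, same cost.

-- ===== PORT A =====
-- the 'for i, (run_start, run_stop) in enumerate(zip(startS, stopS), start=1)' loop
def dbLoop (st et : Int) (startS : List Int) : List (Int × Int) → Nat → String
  | [], _ => "discard"
  | (run_start, run_stop) :: rest, i =>
    if st ≥ run_start ∧ et ≤ run_stop then "mon_down"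
    else if i < startS.length ∧ et ≤ (PySem.List.pyGet? startS (i : Int)).getD 0 then "mon_up"
    else dbLoop st et startS rest (i + 1)

def determine_block (start_time : Int) (end_time : Int) (startS : List Int) (stopS : List Int) : String :=
  if start_time < (PySem.List.pyGet? startS 0).getD 0 ∨ end_time > (PySem.List.pyGet? stopS (-1)).getD 0 then
    "discard"
  else
    dbLoop start_time end_time startS (startS.zip stopS) 1

-- ===== PORT B =====
-- 'start_time >= startS[j] and end_time <= stopS[j]'
def pvP (st et : Int) (startS stopS : List Int) (j : Nat) : Bool :=
  decide (st ≥ startS.getD j 0 ∧ et ≤ stopS.getD j 0)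

-- 'j + 1 < len(startS) and end_time <= startS[j + 1]'
def pvQ (et : Int) (startS : List Int) (j : Nat) : Bool :=
  decide (j + 1 < startS.length ∧ et ≤ startS.getD (j + 1) 0)

def determine_block_alt (start_time : Int) (end_time : Int) (startS : List Int) (stopS : List Int) : String :=
  if start_time < (PySem.List.pyGet? startS 0).getD 0 ∨ end_time > (PySem.List.pyGet? stopS (-1)).getD 0 then
    "discard"
  else
    let n := min startS.length stopS.length
    let d := (List.range n).find? (pvP start_time end_time startS stopS)
    let u := (List.range n).find? (pvQ end_time startS)
    match d, u with
    | none, none => "discard"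
    | some _, none => "mon_down"
    | none, some _ => "mon_up"
    | some jd, some ju => if jd ≤ ju then "mon_down" else "mon_up"

-- ===== PRECONDITION & SPEC =====
-- A raises IndexError when startS is empty (startS[0]), or when stopS is empty and the
-- short-circuited 'or' reaches stopS[-1] (i.e. start_time ≥ startS[0]); exactly those are excluded.
def Pre_determine_block (start_time : Int) (end_time : Int) (startS : List Int) (stopS : List Int) : Prop :=
  startS ≠ [] ∧ (start_time < startS.headD 0 ∨ stopS ≠ [])
instance (start_time : Int) (end_time : Int) (startS : List Int) (stopS : List Int) : Decidable (Pre_determine_block start_time end_time startS stopS) := by unfold Pre_determine_block; infer_instance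

def pvWitness_determine_block : Int × Int × List Int × List Int := (0, 1, [0], [2])

def Spec_determine_block (start_time : Int) (end_time : Int) (startS : List Int) (stopS : List Int) (out : String) : Prop := out = determine_block_alt start_time end_time startS stopS
instance (start_time : Int) (end_time : Int) (startS : List Int) (stopS : List Int) (out : String) : Decidable (Spec_determine_block start_time end_time startS stopS out) := by unfold Spec_determine_block; infer_instance

-- ===== CLAIM (what is proved, stated in full; the proofs are below) =====
def Claim_equal_determine_block : Prop := ∀ (start_time : Int) (end_time : Int) (startS : List Int) (stopS : List Int), Dom_determine_block start_time end_time startS stopS → Pre_determine_block start_time end_time startS stopS → Spec_determine_block start_time end_time startS stopS (determine_block start_time end_time startS stopS)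

-- ===== LEMMAS AND PROOFS =====
def dbClassify : Option Nat → Option Nat → String
  | none, none => "discard"
  | some _, none => "mon_down"
  | none, some _ => "mon_up"
  | some jd, some ju => if jd ≤ ju then "mon_down" else "mon_up"

lemma dbLoop_eq (st et : Int) (startS stopS : List Int) (m : Nat) :
    ∀ k, k + m = min startS.length stopS.length →
      dbLoop st et startS ((startS.zip stopS).drop k) (k + 1) =
        dbClassify ((List.range' k m).find? (pvP st et startS stopS))
                   ((List.range' k m).find? (pvQ et startS)) := by
  induction m with
  | zero =>
    intro k hk
    have : (startS.zip stopS).drop k = [] := by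
      apply List.drop_eq_nil_of_le; simp [List.length_zip]; omega
    simp [this, dbLoop, dbClassify]
  | succ m ih =>
    intro k hk
    have hlen : k < (startS.zip stopS).length := by simp [List.length_zip]; omega
    have hks : k < startS.length := by simp [List.length_zip] at hlen; omega
    have hkt : k < stopS.length := by simp [List.length_zip] at hlen; omega
    rw [List.drop_eq_getElem_cons hlen]
    have hz : (startS.zip stopS)[k] = (startS[k], stopS[k]) := by
      simp [List.getElem_zip]
    rw [hz, List.range'_succ]
    show dbLoop st et startS ((startS[k], stopS[k]) :: (startS.zip stopS).drop (k+1)) (k+1) = _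
    by_cases hP : pvP st et startS stopS k = true
    · have hc : st ≥ startS[k] ∧ et ≤ stopS[k] := by
        have := of_decide_eq_true hP
        simpa [pvP, List.getD_eq_getElem?_getD, hks, hkt] using hP
      rw [List.find?_cons_of_pos hP]
      have : dbLoop st et startS ((startS[k], stopS[k]) :: (startS.zip stopS).drop (k+1)) (k+1)
          = "mon_down" := by
        simp [dbLoop, hc]
      rw [this]
      cases hu : (List.find? (pvQ et startS) (k :: List.range' (k+1) m)) with
      | none => simp [dbClassify]
      | some ju =>
        have hmem := List.mem_of_find?_eq_some hu
        have hju : k ≤ ju := by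
          rcases List.mem_cons.mp hmem with h | h
          · omega
          · have := List.mem_range'_1.mp h; omega
        simp [dbClassify, hju]
    · have hcP : ¬ (st ≥ startS[k] ∧ et ≤ stopS[k]) := by
        intro hc
        apply hP
        simp [pvP, List.getD_eq_getElem?_getD, hks, hkt]
        exact hc
      rw [List.find?_cons_of_neg (by simp [hP])]
      by_cases hQ : pvQ et startS k = true
      · have hcQ : k + 1 < startS.length ∧ et ≤ (PySem.List.pyGet? startS ((k+1 : Nat) : Int)).getD 0 := by
          have h := of_decide_eq_true hQ
          refine ⟨h.1, ?_⟩
          rw [PySem.List.pyGet?_natCast]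
          simpa [List.getD_eq_getElem?_getD] using h.2
        have : dbLoop st et startS ((startS[k], stopS[k]) :: (startS.zip stopS).drop (k+1)) (k+1)
            = "mon_up" := by
          simp only [dbLoop, if_neg hcP]
          rw [if_pos hcQ]
        rw [this, List.find?_cons_of_pos hQ]
        cases hd : (List.find? (pvP st et startS stopS) (List.range' (k+1) m)) with
        | none => simp [dbClassify]
        | some jd =>
          have hmem := List.mem_of_find?_eq_some hd
          have hjd : k + 1 ≤ jd := (List.mem_range'_1.mp hmem).1
          have : ¬ jd ≤ k := by omega
          simp [dbClassify, this]
      · have hcQ : ¬ (k + 1 < startS.length ∧ et ≤ (PySem.List.pyGet? startS ((k+1 : Nat) : Int)).getD 0) := by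
          intro hc
          apply hQ
          rw [PySem.List.pyGet?_natCast] at hc
          simp [pvQ, List.getD_eq_getElem?_getD]
          exact ⟨hc.1, by simpa [List.getD_eq_getElem?_getD] using hc.2⟩
        rw [List.find?_cons_of_neg (by simp [hQ])]
        have : dbLoop st et startS ((startS[k], stopS[k]) :: (startS.zip stopS).drop (k+1)) (k+1)
            = dbLoop st et startS ((startS.zip stopS).drop (k+1)) (k+1+1) := by
          simp only [dbLoop, if_neg hcP]
          rw [if_neg hcQ]
        rw [this]
        exact ih (k+1) (by omega)

-- ===== VERDICT (by name: the statement is the Claim_ definition above) =====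
theorem determine_block_spec : Claim_equal_determine_block := by
  intro st et startS stopS _ _
  show determine_block st et startS stopS = determine_block_alt st et startS stopS
  unfold determine_block determine_block_alt
  by_cases hg : st < (PySem.List.pyGet? startS 0).getD 0 ∨ et > (PySem.List.pyGet? stopS (-1)).getD 0
  · rw [if_pos hg, if_pos hg]
  · rw [if_neg hg, if_neg hg]
    have h := dbLoop_eq st et startS stopS (min startS.length stopS.length) 0 (by omega)
    simp only [List.drop_zero] at h
    rw [← List.range_eq_range'] at h
    rw [h]
    rfl
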